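-- pv_equiv track=rewrite | github.com/zazu-22/ff_data_analytics | src/ingest/sheets/commissioner_parser.py | _extract_suffix
-- ===== SOURCE A (Python) =====
-- def _extract_suffix(name: str | None) -> tuple[str, str | None]:
--     """Extract generational suffix from player name.
--
--     Handles Jr/Jr./Junior, Sr/Sr./Senior, II, III, IV, V variations.
--
--     Args:
--         name: Raw player name (e.g., "Marvin Harrison Jr.")
--
--     Returns:
--         Tuple of (base_name, suffix) where suffix is normalized or None
--
--     Examples:
--         >>> _extract_suffix("Marvin Harrison Jr.")
--         ("Marvin Harrison", "Jr.")
--         >>> _extract_suffix("Patrick Mahomes II")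
--         ("Patrick Mahomes", "II")
--         >>> _extract_suffix("Tom Brady")
--         ("Tom Brady", None)
--
--     """
--     if not name:
--         return "", None
--
--     # Remove periods from initials (A.J. → AJ) but preserve suffix periods
--     name_clean = name.strip()
--
--     # Define suffix patterns (order matters - check longer patterns first)
--     suffix_patterns = [
--         (" Junior", " Jr."),  # Normalize "Junior" to "Jr."
--         (" Jr.", " Jr."),
--         (" Jr", " Jr."),
--         (" Senior", " Sr."),  # Normalize "Senior" to "Sr."
--         (" Sr.", " Sr."),
--         (" Sr", " Sr."),
--         (" II", " II"),
--         (" III", " III"),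
--         (" IV", " IV"),
--         (" V", " V"),
--     ]
--
--     for pattern, normalized_suffix in suffix_patterns:
--         if name_clean.endswith(pattern):
--             base_name = name_clean[: -len(pattern)].strip()
--             return base_name, normalized_suffix.strip()
--
--     return name_clean, None
-- ===== SOURCE B (Python) =====
-- _SUFFIX_MAP = {
--     "Junior": "Jr.",
--     "Jr.": "Jr.",
--     "Jr": "Jr.",
--     "Senior": "Sr.",
--     "Sr.": "Sr.",
--     "Sr": "Sr.",
--     "II": "II",
--     "III": "III",
--     "IV": "IV",
--     "V": "V",
-- }
--
--
-- def _extract_suffix(name):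
--     """Split the last space-separated token off and normalize it via a dict lookup."""
--     if not name:
--         return "", None
--     name_clean = name.strip()
--     head, sep, tail = name_clean.rpartition(" ")
--     if sep:
--         suffix = _SUFFIX_MAP.get(tail)
--         if suffix is not None:
--             return head.strip(), suffix
--     return name_clean, None
-- ===== Notes on version B (the rewrite author's own statement) =====
-- stated objective: idiomatic
-- what changed: Replaces A's ordered endswith-scan over ten space-led suffix patterns (with a negative slice and re-strip per match) by a single rpartition at the last space plus one dict lookup of the final token.
import Mathlib
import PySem

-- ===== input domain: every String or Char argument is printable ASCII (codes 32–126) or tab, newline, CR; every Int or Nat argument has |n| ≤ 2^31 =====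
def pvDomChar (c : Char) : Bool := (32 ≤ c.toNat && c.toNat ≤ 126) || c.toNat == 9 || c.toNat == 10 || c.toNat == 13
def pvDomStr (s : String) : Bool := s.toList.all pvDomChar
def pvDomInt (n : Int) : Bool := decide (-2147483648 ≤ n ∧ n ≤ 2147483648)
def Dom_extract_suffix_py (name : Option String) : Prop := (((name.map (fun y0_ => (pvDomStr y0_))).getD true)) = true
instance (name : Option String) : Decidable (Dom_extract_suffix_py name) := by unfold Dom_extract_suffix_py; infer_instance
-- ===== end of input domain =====

-- B replaces A's ordered endswith-scan over ten suffix patterns by one rpartition at the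
-- last space plus a dict lookup of the final token (objective: idiomatic; same cost).

-- ===== PORT A =====
-- the ten (pattern, normalized) pairs, as char lists (" Junior" = [' ','J','u','n','i','o','r'], …)
def pvPatterns : List (List Char × List Char) :=
  [([' ','J','u','n','i','o','r'], [' ','J','r','.']),
   ([' ','J','r','.'],             [' ','J','r','.']),
   ([' ','J','r'],                 [' ','J','r','.']),
   ([' ','S','e','n','i','o','r'], [' ','S','r','.']),
   ([' ','S','r','.'],             [' ','S','r','.']),
   ([' ','S','r'],                 [' ','S','r','.']),
   ([' ','I','I'],                 [' ','I','I']),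
   ([' ','I','I','I'],             [' ','I','I','I']),
   ([' ','I','V'],                 [' ','I','V']),
   ([' ','V'],                     [' ','V'])]

-- the 'for pattern, normalized_suffix in suffix_patterns:' loop with its early return
def pvScanA (nc : List Char) : List (List Char × List Char) → List Char × Option (List Char)
  | [] => (nc, none)
  | (p, norm) :: rest =>
    if PySem.Chars.endswith nc p then
      (PySem.Chars.strip (PySem.List.slice nc none (some (-(p.length : Int)))),
       some (PySem.Chars.strip norm))
    else pvScanA nc rest

def extract_suffix_py (name : Option String) : String × Option String :=
  match name with
  | none => ("", none)
  | some s =>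
    if s = "" then ("", none)               -- 'if not name'
    else
      let res := pvScanA (PySem.Chars.strip s.toList) pvPatterns
      (String.ofList res.1, res.2.map String.ofList)

-- ===== PORT B =====
-- _SUFFIX_MAP, keys/values as char lists
def pvSuffixMap : PySem.Dict (List Char) (List Char) :=
  PySem.Dict.ofList
    [(['J','u','n','i','o','r'], ['J','r','.']),
     (['J','r','.'],             ['J','r','.']),
     (['J','r'],                 ['J','r','.']),
     (['S','e','n','i','o','r'], ['S','r','.']),
     (['S','r','.'],             ['S','r','.']),
     (['S','r'],                 ['S','r','.']),
     (['I','I'],                 ['I','I']),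
     (['I','I','I'],             ['I','I','I']),
     (['I','V'],                 ['I','V']),
     (['V'],                     ['V'])]

-- name_clean.rpartition(" ") + _SUFFIX_MAP.get(tail); rpartition at the single-space
-- separator is, exactly, a split at the reversed list's first space
def pvRpartLookup (nc : List Char) : List Char × Option (List Char) :=
  match nc.reverse.dropWhile (fun c => c != ' ') with
  | [] => (nc, none)                        -- sep = "": no space found
  | _ :: hr =>
    match PySem.Dict.get? pvSuffixMap ((nc.reverse.takeWhile (fun c => c != ' ')).reverse) with
    | some suf => (PySem.Chars.strip hr.reverse, some suf)
    | none => (nc, none)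

def extract_suffix_py_alt (name : Option String) : String × Option String :=
  match name with
  | none => ("", none)
  | some s =>
    if s = "" then ("", none)               -- 'if not name'
    else
      let res := pvRpartLookup (PySem.Chars.strip s.toList)
      (String.ofList res.1, res.2.map String.ofList)

-- ===== PRECONDITION & SPEC =====
def Spec_extract_suffix_py (name : Option String) (out : String × Option String) : Prop := out = extract_suffix_py_alt name
instance (name : Option String) (out : String × Option String) : Decidable (Spec_extract_suffix_py name out) := by unfold Spec_extract_suffix_py; infer_instance

-- ===== CLAIM (what is proved, stated in full; the proofs are below) =====
def Claim_equal_extract_suffix_py : Prop := ∀ (name : Option String), Dom_extract_suffix_py name → Spec_extract_suffix_py name (extract_suffix_py name)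

-- ===== LEMMAS AND PROOFS =====

-- two space-free decompositions around a space agree
lemma pv_space_split_uniq (a : List Char) :
    ∀ (c b d : List Char), (∀ x ∈ a, x ≠ ' ') → (∀ x ∈ c, x ≠ ' ') →
      a ++ ' ' :: b = c ++ ' ' :: d → a = c ∧ b = d := by
  induction a with
  | nil =>
    intro c b d _ hc h
    cases c with
    | nil => simpa using h
    | cons y c' =>
      simp only [List.nil_append, List.cons_append, List.cons.injEq] at h
      exact absurd h.1.symm (hc y (by simp))
  | cons x a' ih =>
    intro c b d ha hc h
    cases c with
    | nil =>
      simp only [List.cons_append, List.nil_append, List.cons.injEq] at h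
      exact absurd h.1 (ha x (by simp))
    | cons y c' =>
      simp only [List.cons_append, List.cons.injEq] at h
      obtain ⟨hxy, h2⟩ := h
      obtain ⟨h3, h4⟩ := ih c' b d (fun z hz => ha z (by simp [hz])) (fun z hz => hc z (by simp [hz])) h2
      exact ⟨by simp [hxy, h3], h4⟩

-- a space-led pattern never matches a space-free string
lemma pv_endswith_nospace {nc : List Char} (h : ∀ x ∈ nc, x ≠ ' ') :
    ∀ p, PySem.Chars.endswith nc (' ' :: p) = false := by
  intro p
  by_contra hb
  have hsuf : (' ' :: p) <:+ nc :=
    (PySem.Chars.endswith_iff nc (' ' :: p)).mp (by revert hb; cases PySem.Chars.endswith nc (' ' :: p) <;> simp)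
  exact h ' ' (hsuf.subset (by simp)) rfl

-- endswith against the last-space decomposition is equality of the final token
lemma pv_endswith_split (pre : List Char) {tail : List Char} (htail : ∀ x ∈ tail, x ≠ ' ')
    {p : List Char} (hp : ∀ x ∈ p, x ≠ ' ') :
    PySem.Chars.endswith (pre ++ ' ' :: tail) (' ' :: p) = decide (tail = p) := by
  by_cases he : tail = p
  · rw [he]
    simp only [decide_true]
    exact (PySem.Chars.endswith_iff _ _).mpr ⟨pre, rfl⟩
  · simp only [he, decide_false]
    by_contra hb
    have hsuf : (' ' :: p) <:+ (pre ++ ' ' :: tail) :=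
      (PySem.Chars.endswith_iff _ _).mp (by revert hb; cases PySem.Chars.endswith (pre ++ ' ' :: tail) (' ' :: p) <;> simp)
    obtain ⟨t, ht⟩ := hsuf
    have hrev : p.reverse ++ ' ' :: t.reverse = tail.reverse ++ ' ' :: pre.reverse := by
      have := congrArg List.reverse ht
      simpa [List.reverse_append] using this
    have := pv_space_split_uniq p.reverse tail.reverse t.reverse pre.reverse
      (fun z hz => hp z (List.mem_reverse.mp hz)) (fun z hz => htail z (List.mem_reverse.mp hz)) hrev
    exact he (by simpa using congrArg List.reverse this.1.symm)

-- the base-name slice nc[:-len(pattern)] is exactly the part before the last space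
lemma pv_slice_base (pre lit : List Char) :
    PySem.Chars.strip (PySem.List.slice (pre ++ ' ' :: lit) none (some (-(((' ' :: lit).length : Nat) : Int)))) =
      PySem.Chars.strip pre := by
  rw [PySem.List.slice_to_neg_natCast _ _ (by simp)]
  have hl : (pre ++ ' ' :: lit).length - (' ' :: lit).length = pre.length := by simp
  rw [hl, List.take_left]

-- the heart: A's pattern scan equals B's token lookup on the last-space decomposition
set_option maxRecDepth 4096 in
lemma pv_core (pre tail : List Char) (htail : ∀ x ∈ tail, x ≠ ' ') :
    pvScanA (pre ++ ' ' :: tail) pvPatterns =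
      match PySem.Dict.get? pvSuffixMap tail with
      | some suf => (PySem.Chars.strip pre, some suf)
      | none => (pre ++ ' ' :: tail, none) := by
  have hitems : pvSuffixMap.items =
    [(['J','u','n','i','o','r'], ['J','r','.']), (['J','r','.'], ['J','r','.']),
     (['J','r'], ['J','r','.']), (['S','e','n','i','o','r'], ['S','r','.']),
     (['S','r','.'], ['S','r','.']), (['S','r'], ['S','r','.']),
     (['I','I'], ['I','I']), (['I','I','I'], ['I','I','I']),
     (['I','V'], ['I','V']), (['V'], ['V'])] := by decide
  simp only [pvScanA, pvPatterns]
  rw [pv_endswith_split pre htail (p := ['J','u','n','i','o','r']) (by simp),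
      pv_endswith_split pre htail (p := ['J','r','.']) (by simp),
      pv_endswith_split pre htail (p := ['J','r']) (by simp),
      pv_endswith_split pre htail (p := ['S','e','n','i','o','r']) (by simp),
      pv_endswith_split pre htail (p := ['S','r','.']) (by simp),
      pv_endswith_split pre htail (p := ['S','r']) (by simp),
      pv_endswith_split pre htail (p := ['I','I']) (by simp),
      pv_endswith_split pre htail (p := ['I','I','I']) (by simp),
      pv_endswith_split pre htail (p := ['I','V']) (by simp),
      pv_endswith_split pre htail (p := ['V']) (by simp)]
  simp only [decide_eq_true_eq]
  split_ifs with h1 h2 h3 h4 h5 h6 h7 h8 h9 h10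
  · subst h1
    rw [pv_slice_base,
        show PySem.Dict.get? pvSuffixMap ['J','u','n','i','o','r'] = some ['J','r','.'] from by decide,
        show PySem.Chars.strip [' ','J','r','.'] = ['J','r','.'] from by decide]
  · subst h2
    rw [pv_slice_base,
        show PySem.Dict.get? pvSuffixMap ['J','r','.'] = some ['J','r','.'] from by decide,
        show PySem.Chars.strip [' ','J','r','.'] = ['J','r','.'] from by decide]
  · subst h3
    rw [pv_slice_base,
        show PySem.Dict.get? pvSuffixMap ['J','r'] = some ['J','r','.'] from by decide,
        show PySem.Chars.strip [' ','J','r','.'] = ['J','r','.'] from by decide]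
  · subst h4
    rw [pv_slice_base,
        show PySem.Dict.get? pvSuffixMap ['S','e','n','i','o','r'] = some ['S','r','.'] from by decide,
        show PySem.Chars.strip [' ','S','r','.'] = ['S','r','.'] from by decide]
  · subst h5
    rw [pv_slice_base,
        show PySem.Dict.get? pvSuffixMap ['S','r','.'] = some ['S','r','.'] from by decide,
        show PySem.Chars.strip [' ','S','r','.'] = ['S','r','.'] from by decide]
  · subst h6
    rw [pv_slice_base,
        show PySem.Dict.get? pvSuffixMap ['S','r'] = some ['S','r','.'] from by decide,
        show PySem.Chars.strip [' ','S','r','.'] = ['S','r','.'] from by decide]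
  · subst h7
    rw [pv_slice_base,
        show PySem.Dict.get? pvSuffixMap ['I','I'] = some ['I','I'] from by decide,
        show PySem.Chars.strip [' ','I','I'] = ['I','I'] from by decide]
  · subst h8
    rw [pv_slice_base,
        show PySem.Dict.get? pvSuffixMap ['I','I','I'] = some ['I','I','I'] from by decide,
        show PySem.Chars.strip [' ','I','I','I'] = ['I','I','I'] from by decide]
  · subst h9
    rw [pv_slice_base,
        show PySem.Dict.get? pvSuffixMap ['I','V'] = some ['I','V'] from by decide,
        show PySem.Chars.strip [' ','I','V'] = ['I','V'] from by decide]
  · subst h10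
    rw [pv_slice_base,
        show PySem.Dict.get? pvSuffixMap ['V'] = some ['V'] from by decide,
        show PySem.Chars.strip [' ','V'] = ['V'] from by decide]
  · have hnone : PySem.Dict.get? pvSuffixMap tail = none := by
      simp only [PySem.Dict.get?, hitems, List.find?_eq_none, beq_iff_eq, Prod.forall,
        Option.map_eq_none_iff]
      simp only [List.mem_cons, List.not_mem_nil, or_false]
      rintro a b (⟨rfl, rfl⟩|⟨rfl, rfl⟩|⟨rfl, rfl⟩|⟨rfl, rfl⟩|⟨rfl, rfl⟩|⟨rfl, rfl⟩|⟨rfl, rfl⟩|⟨rfl, rfl⟩|⟨rfl, rfl⟩|h) <;>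
        first
        | (exact Ne.symm ‹¬ tail = _›)
        | (obtain ⟨rfl, rfl⟩ := h; exact Ne.symm h10)
    rw [hnone]

-- A's scan equals B's rpartition+lookup on every string
lemma pv_scan_eq_lookup (nc : List Char) : pvScanA nc pvPatterns = pvRpartLookup nc := by
  cases h : nc.reverse.dropWhile (fun c => c != ' ') with
  | nil =>
    have hns : ∀ x ∈ nc, x ≠ ' ' := by
      intro x hx
      have := List.dropWhile_eq_nil_iff.mp h x (List.mem_reverse.mpr hx)
      simpa using this
    simp only [pvRpartLookup, h]
    simp only [pvScanA, pvPatterns, pv_endswith_nospace hns, Bool.false_eq_true, if_false]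
  | cons c hr =>
    have hc : c = ' ' := by
      have h2 := List.head?_dropWhile_not (fun c => c != ' ') nc.reverse
      rw [h] at h2
      simpa using h2
    subst hc
    have htail : ∀ x ∈ (nc.reverse.takeWhile (fun c => c != ' ')).reverse, x ≠ ' ' := by
      intro x hx
      have := List.mem_takeWhile_imp (List.mem_reverse.mp hx)
      simpa using this
    have hdec : nc = hr.reverse ++ ' ' :: (nc.reverse.takeWhile (fun c => c != ' ')).reverse := by
      conv_lhs => rw [← nc.reverse_reverse,
        ← List.takeWhile_append_dropWhile (p := fun c => c != ' ') (l := nc.reverse), h]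
      simp
    simp only [pvRpartLookup, h]
    conv_lhs => rw [hdec]
    conv_rhs => rw [show (nc, (none : Option (List Char))) =
      (hr.reverse ++ ' ' :: (nc.reverse.takeWhile (fun c => c != ' ')).reverse,
       (none : Option (List Char))) from by rw [← hdec]]
    exact pv_core hr.reverse _ htail

-- ===== VERDICT (by name: the statement is the Claim_ definition above) =====
theorem extract_suffix_py_spec : Claim_equal_extract_suffix_py := by
  unfold Claim_equal_extract_suffix_py Spec_extract_suffix_py
  intro name _
  cases name with
  | none => rfl
  | some s =>
    simp only [extract_suffix_py, extract_suffix_py_alt]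
    by_cases hs : s = ""
    · simp [hs]
    · simp only [hs, if_false, pv_scan_eq_lookup]
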